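-- pv_equiv track=rewrite | github.com/sambiam/Farmbot-for-Home-Assistant | custom_components/farmbot/manager.py | _split_host_port
-- ===== SOURCE A (Python) =====
-- from typing import Tuple, Optional
--
-- def _split_host_port(raw_host: str, default_port: int) -> Tuple[str, int]:
--     """Strip schemes like mqtts:// or amqps:// and split out ':port' if present."""
--     host = (raw_host or "").strip()
--     for scheme in ("mqtts://", "mqtt://", "amqps://", "amqp://", "ssl://", "tcp://", "wss://", "ws://"):
--         if host.lower().startswith(scheme):
--             host = host[len(scheme):]
--             break
--     port = default_port
--     if ":" in host:
--         h, p = host.rsplit(":", 1)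
--         if p.isdigit():
--             host, port = h, int(p)
--     return host, port
-- ===== SOURCE B (Python) =====
-- _SCHEMES = ("mqtts", "mqtt", "amqps", "amqp", "ssl", "tcp", "wss", "ws")
--
-- def _split_host_port(raw_host, default_port):
--     host = (raw_host or "").strip()
--     port = default_port
--     # Peel the ':port' tail FIRST, by scanning digits backwards from the end;
--     # the scheme's '://' colon is never followed by digits only, so this is safe.
--     i = len(host) - 1
--     while i >= 0 and host[i].isdigit():
--         i -= 1
--     if 0 <= i < len(host) - 1 and host[i] == ":":
--         port = int(host[i + 1:])
--         host = host[:i]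
--     # Then drop a recognized scheme: partition once at the first '://'.
--     head, sep, tail = host.partition("://")
--     if sep and head.lower() in _SCHEMES:
--         host = tail
--     return host, port
-- ===== Notes on version B (the rewrite author's own statement) =====
-- stated objective: alternative
-- what changed: B reverses the two phases and replaces both primitives: it first peels the ':port' tail with a manual backward digit scan (no rsplit/isdigit on a substring), then removes the scheme with a single partition at the first '://' plus a membership test, instead of A's scheme-prefix loop followed by rsplit.
import Mathlib
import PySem

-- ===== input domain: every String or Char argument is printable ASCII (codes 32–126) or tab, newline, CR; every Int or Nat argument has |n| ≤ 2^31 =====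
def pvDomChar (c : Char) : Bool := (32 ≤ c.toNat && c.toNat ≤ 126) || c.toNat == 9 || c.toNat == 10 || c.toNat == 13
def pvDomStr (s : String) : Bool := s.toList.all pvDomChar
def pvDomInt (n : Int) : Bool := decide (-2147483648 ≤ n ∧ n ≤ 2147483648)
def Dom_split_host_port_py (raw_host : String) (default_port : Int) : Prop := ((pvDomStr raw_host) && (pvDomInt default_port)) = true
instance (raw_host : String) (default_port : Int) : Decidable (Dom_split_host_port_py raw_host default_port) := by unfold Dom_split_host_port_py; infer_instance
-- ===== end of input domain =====

-- B reverses A's two phases and changes both: it first peels the ':port' tail by a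
-- manual backward digit scan (instead of A's rsplit(':',1) + isdigit), then removes
-- the scheme with a single partition at the first '://' plus one membership test
-- (instead of A's eight-prefix startswith loop); objective: alternative.

-- ===== PORT A =====
-- the tuple of scheme prefixes A iterates over, in A's order
def pvSchemesA : List (List Char) :=
  ["mqtts://".toList, "mqtt://".toList, "amqps://".toList, "amqp://".toList,
   "ssl://".toList, "tcp://".toList, "wss://".toList, "ws://".toList]

-- for scheme in (...): if host.lower().startswith(scheme): host = host[len(scheme):]; break
def pvStripLoopA : List (List Char) → List Char → List Char
  | [], host => host
  | s :: rest, host =>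
    if PySem.Chars.startswith (PySem.Chars.lower host) s then host.drop s.length
    else pvStripLoopA rest host

-- port = default_port; if ":" in host: h, p = host.rsplit(":", 1); if p.isdigit(): host, port = h, int(p)
-- host.rsplit(":", 1) with ":" in host splits at the LAST ':' (rfind); int(p) is exact
-- here because the isdigit guard ensures p is a nonempty ASCII digit string.
def pvPortTail (host : List Char) (default_port : Int) : List Char × Int :=
  if PySem.Chars.isIn [':'] host then
    let i := (PySem.Chars.rfind host [':']).toNat
    let p := host.drop (i + 1)
    if PySem.Chars.strIsdigit p then (host.take i, (PySem.Int.ofChars? p).getD 0)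
    else (host, default_port)
  else (host, default_port)

def split_host_port_py (raw_host : String) (default_port : Int) : String × Int :=
  -- (raw_host or "") on a str equals raw_host ("" is the only falsy str)
  let host := PySem.Chars.strip raw_host.toList
  let host := pvStripLoopA pvSchemesA host
  let r := pvPortTail host default_port
  (String.ofList r.1, r.2)

-- ===== PORT B =====
-- _SCHEMES = ("mqtts", "mqtt", "amqps", "amqp", "ssl", "tcp", "wss", "ws")
def pvSchemeNames : List (List Char) :=
  ["mqtts".toList, "mqtt".toList, "amqps".toList, "amqp".toList,
   "ssl".toList, "tcp".toList, "wss".toList, "ws".toList]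

-- i = len(host) - 1; while i >= 0 and host[i].isdigit(): i -= 1
-- ported as structural recursion on i + 1 (a Nat); the i >= 0 guard is the 0 case,
-- host[i] is in range whenever read, so the getD default is never used
def pvScanB (host : List Char) : Nat → Int
  | 0 => -1
  | k + 1 => if PySem.Chars.isdigit (host.getD k ' ') then pvScanB host k else (k : Int)

-- head, sep, tail = host.partition("://")  — hand port of str.partition (no PySem
-- primitive): split at the FIRST occurrence of sep; exact for nonempty sep
def pvPartition3 (host sep : List Char) : List Char × List Char × List Char :=
  let f := PySem.Chars.find host sep
  if f = -1 then (host, [], [])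
  else (host.take f.toNat, sep, host.drop (f.toNat + sep.length))

def split_host_port_py_alt (raw_host : String) (default_port : Int) : String × Int :=
  let host := PySem.Chars.strip raw_host.toList
  let i := pvScanB host host.length
  -- if 0 <= i < len(host) - 1 and host[i] == ":": port = int(host[i+1:]); host = host[:i]
  -- int(host[i+1:]) is exact: the scan guarantees nonempty ASCII digits there
  let hp :=
    if 0 ≤ i ∧ i < (host.length : Int) - 1 ∧ host.getD i.toNat ' ' = ':' then
      (host.take i.toNat, (PySem.Int.ofChars? (host.drop (i.toNat + 1))).getD 0)
    else (host, default_port)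
  let r := pvPartition3 hp.1 [':', '/', '/']
  -- if sep and head.lower() in _SCHEMES: host = tail
  let host2 :=
    if !r.2.1.isEmpty && PySem.Set.contains pvSchemeNames (PySem.Chars.lower r.1) then r.2.2
    else hp.1
  (String.ofList host2, hp.2)

-- ===== PRECONDITION & SPEC =====
def Spec_split_host_port_py (raw_host : String) (default_port : Int) (out : String × Int) : Prop := out = split_host_port_py_alt raw_host default_port
instance (raw_host : String) (default_port : Int) (out : String × Int) : Decidable (Spec_split_host_port_py raw_host default_port out) := by unfold Spec_split_host_port_py; infer_instance

-- ===== CLAIM (what is proved, stated in full; the proofs are below) =====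
def Claim_equal_split_host_port_py : Prop := ∀ (raw_host : String) (default_port : Int), Dom_split_host_port_py raw_host default_port → Spec_split_host_port_py raw_host default_port (split_host_port_py raw_host default_port)

-- ===== LEMMAS AND PROOFS =====

def pvSep : List Char := [':', '/', '/']

-- canonical form of the scheme-stripping step, shared by the proofs of both sides
def pvStripC (cs : List Char) : List Char :=
  if PySem.Chars.find cs pvSep != -1 &&
      PySem.Set.contains pvSchemeNames
        (PySem.Chars.lower (cs.take (PySem.Chars.find cs pvSep).toNat))
  then cs.drop ((PySem.Chars.find cs pvSep).toNat + 3) else cs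

lemma pv_char_le_toNat (a b : Char) : a ≤ b ↔ a.toNat ≤ b.toNat := by
  rw [Char.le_def]; exact UInt32.le_iff_toNat_le

-- lowerChar fixes every character that is neither an upper- nor a lower-case ASCII letter
lemma pv_lowerChar_fix (c t : Char)
    (ht : t.toNat < 65 ∨ (90 < t.toNat ∧ t.toNat < 97) ∨ 122 < t.toNat) :
    PySem.Chars.lowerChar c = t ↔ c = t := by
  unfold PySem.Chars.lowerChar PySem.Chars.isupper
  split_ifs with h
  · simp only [Bool.and_eq_true, decide_eq_true_eq, pv_char_le_toNat] at h
    have e1 : 'A'.toNat = 65 := rfl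
    have e2 : 'Z'.toNat = 90 := rfl
    rw [e1] at h; rw [e2] at h
    constructor
    · intro he
      exfalso
      have hv : (c.toNat + 32).isValidChar := Or.inl (by omega)
      have hn : (Char.ofNat (c.toNat + 32)).toNat = c.toNat + 32 := by
        rw [Char.toNat_ofNat, if_pos hv]
      rw [he] at hn
      omega
    · intro he
      subst he
      exfalso; omega
  · exact Iff.rfl

-- a scheme name w (no ':') followed by "://" prefixes the lowered host exactly when
-- the first "://" of the host sits at index |w| and the segment before it lowers to w
lemma pv_fwd (cs w : List Char) (hw : ':' ∉ w)
    (h : (w ++ pvSep) <+: PySem.Chars.lower cs) :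
    PySem.Chars.find cs pvSep = (w.length : Int) ∧
      PySem.Chars.lower (cs.take w.length) = w := by
  obtain ⟨rest, hrest⟩ := h
  have hmap : List.map PySem.Chars.lowerChar cs = w ++ (pvSep ++ rest) := by
    rw [← List.append_assoc, hrest]; rfl
  have htake : PySem.Chars.lower (cs.take w.length) = w := by
    show List.map PySem.Chars.lowerChar (cs.take w.length) = w
    rw [List.map_take, hmap, List.take_left]
  have hdropmap : List.map PySem.Chars.lowerChar (cs.drop w.length) = pvSep ++ rest := by
    rw [List.map_drop, hmap, List.drop_left]
  have hdrop3 : pvSep <+: cs.drop w.length := by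
    rcases hd : cs.drop w.length with _ | ⟨c1, _ | ⟨c2, _ | ⟨c3, t⟩⟩⟩ <;>
      rw [hd] at hdropmap <;> simp [pvSep] at hdropmap
    obtain ⟨h1, h2, h3, -⟩ := hdropmap
    rw [pv_lowerChar_fix c1 ':' (by decide)] at h1
    rw [pv_lowerChar_fix c2 '/' (by decide)] at h2
    rw [pv_lowerChar_fix c3 '/' (by decide)] at h3
    subst h1; subst h2; subst h3
    exact ⟨t, rfl⟩
  have hocc : ∀ j < w.length, ¬ pvSep <+: cs.drop j := by
    intro j hj hpre
    obtain ⟨t, ht⟩ := hpre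
    have hj1 : cs[j]? = some ':' := by
      have h0 : (cs.drop j)[0]? = some ':' := by rw [← ht]; rfl
      rw [List.getElem?_drop] at h0; simpa using h0
    have hm : (List.map PySem.Chars.lowerChar cs)[j]? = some ':' := by
      rw [List.getElem?_map, hj1]; rfl
    rw [hmap, List.getElem?_append_left (by omega)] at hm
    exact hw (List.mem_of_getElem? hm)
  have hnn : 0 ≤ PySem.Chars.find cs pvSep := by
    rw [PySem.Chars.find_nonneg_iff, ← PySem.Chars.isIn_iff_infix,
      ← PySem.Chars.exists_prefix_drop_iff_isIn]
    exact ⟨w.length, hdrop3⟩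
  obtain ⟨hpre, hmin⟩ := PySem.Chars.find_spec hnn
  have h1 : (PySem.Chars.find cs pvSep).toNat ≤ w.length := by
    by_contra hlt
    push Not at hlt
    exact hmin w.length hlt hdrop3
  have h2 : ¬ (PySem.Chars.find cs pvSep).toNat < w.length := fun hh => hocc _ hh hpre
  have heq : (PySem.Chars.find cs pvSep).toNat = w.length := by omega
  exact ⟨by rw [← Int.toNat_of_nonneg hnn, heq], htake⟩

-- converse: if the first "://" sits at index n, the scheme made of the lowered first
-- n characters prefixes the lowered host
lemma pv_bwd (cs : List Char) (n : Nat) (h : PySem.Chars.find cs pvSep = (n : Int)) :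
    (PySem.Chars.lower (cs.take n) ++ pvSep) <+: PySem.Chars.lower cs := by
  have hnn : 0 ≤ PySem.Chars.find cs pvSep := by rw [h]; exact Int.natCast_nonneg n
  obtain ⟨hpre, -⟩ := PySem.Chars.find_spec hnn
  rw [h, Int.toNat_natCast] at hpre
  obtain ⟨t, ht⟩ := hpre
  refine ⟨List.map PySem.Chars.lowerChar t, ?_⟩
  show PySem.Chars.lower (cs.take n) ++ pvSep ++ List.map PySem.Chars.lowerChar t
      = PySem.Chars.lower cs
  have : PySem.Chars.lower cs
      = List.map PySem.Chars.lowerChar (cs.take n) ++ List.map PySem.Chars.lowerChar (cs.drop n) := by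
    show List.map PySem.Chars.lowerChar cs = _
    rw [← List.map_append, List.take_append_drop]
  rw [this, ← ht]
  show _ = _ ++ (List.map PySem.Chars.lowerChar pvSep ++ List.map PySem.Chars.lowerChar t)
  rw [List.append_assoc]
  rfl

lemma pv_schemesA_eq : pvSchemesA = pvSchemeNames.map (· ++ pvSep) := by decide

lemma pv_names_nocolon : ∀ u ∈ pvSchemeNames, ':' ∉ u := by decide

lemma pv_loop_none (cs : List Char) (us : List (List Char))
    (h : ∀ u ∈ us, ¬ PySem.Chars.startswith (PySem.Chars.lower cs) (u ++ pvSep) = true) :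
    pvStripLoopA (us.map (· ++ pvSep)) cs = cs := by
  induction us with
  | nil => rfl
  | cons u rest ih =>
    simp only [List.map_cons, pvStripLoopA]
    rw [if_neg (by exact fun hh => h u (by simp) hh)]
    exact ih fun v hv => h v (by simp [hv])

lemma pv_loop_hit (cs : List Char) (us : List (List Char)) (w : List Char)
    (h1 : ∀ u ∈ us, PySem.Chars.startswith (PySem.Chars.lower cs) (u ++ pvSep) = true → u = w)
    (hw : w ∈ us)
    (hM : PySem.Chars.startswith (PySem.Chars.lower cs) (w ++ pvSep) = true) :
    pvStripLoopA (us.map (· ++ pvSep)) cs = cs.drop (w.length + 3) := by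
  induction us with
  | nil => cases hw
  | cons u rest ih =>
    simp only [List.map_cons, pvStripLoopA]
    by_cases hu : PySem.Chars.startswith (PySem.Chars.lower cs) (u ++ pvSep) = true
    · rw [if_pos hu]
      have := h1 u (by simp) hu
      subst this
      simp [pvSep]
    · rw [if_neg hu]
      have hwr : w ∈ rest := by
        rcases List.mem_cons.mp hw with h' | h'
        · subst h'; exact absurd hM hu
        · exact h'
      exact ih (fun v hv => h1 v (by simp [hv])) hwr

-- A's scheme-stripping loop computes the canonical form
lemma pv_strip_eq (cs : List Char) : pvStripLoopA pvSchemesA cs = pvStripC cs := by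
  unfold pvStripC
  rw [pv_schemesA_eq]
  by_cases hneg : PySem.Chars.find cs pvSep = -1
  · rw [pv_loop_none cs _ ?_]
    · simp [hneg]
    · intro u hu hM
      have := (pv_fwd cs u (pv_names_nocolon u hu) ((PySem.Chars.startswith_iff _ _).mp hM)).1
      rw [hneg] at this
      omega
  · have hnn : 0 ≤ PySem.Chars.find cs pvSep := by
      have := PySem.Chars.neg_one_le_find cs pvSep
      omega
    set n := (PySem.Chars.find cs pvSep).toNat with hn
    have hfn : PySem.Chars.find cs pvSep = (n : Int) := (Int.toNat_of_nonneg hnn).symm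
    by_cases hmem : PySem.Set.contains pvSchemeNames (PySem.Chars.lower (cs.take n)) = true
    · set w := PySem.Chars.lower (cs.take n) with hwdef
      have hwmem : w ∈ pvSchemeNames := (PySem.Set.contains_iff _ _).mp hmem
      have hM : PySem.Chars.startswith (PySem.Chars.lower cs) (w ++ pvSep) = true := by
        rw [PySem.Chars.startswith_iff]
        exact pv_bwd cs n hfn
      have hlen : w.length = n := by
        have := (pv_fwd cs w (pv_names_nocolon w hwmem) ((PySem.Chars.startswith_iff _ _).mp hM)).1
        rw [hfn] at this
        omega
      rw [pv_loop_hit cs _ w ?_ hwmem hM, hlen]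
      · rw [if_pos]
        simp only [Bool.and_eq_true, bne_iff_ne, ne_eq]
        exact ⟨hneg, hmem⟩
      · intro u hu hMu
        obtain ⟨hf, ht⟩ := pv_fwd cs u (pv_names_nocolon u hu) ((PySem.Chars.startswith_iff _ _).mp hMu)
        have hul : u.length = n := by rw [hfn] at hf; omega
        rw [hul] at ht
        rw [hwdef, ← ht]
    · rw [pv_loop_none cs _ ?_]
      · rw [if_neg]
        simp only [Bool.and_eq_true, not_and]
        exact fun _ => fun hh => hmem hh
      · intro u hu hMu
        obtain ⟨hf, ht⟩ := pv_fwd cs u (pv_names_nocolon u hu) ((PySem.Chars.startswith_iff _ _).mp hMu)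
        have hul : u.length = n := by rw [hfn] at hf; omega
        rw [hul] at ht
        exact absurd ((PySem.Set.contains_iff _ _).mpr (by rw [ht]; exact hu)) hmem

-- B's partition + membership step is the same canonical form
lemma pv_stripB_eq (h : List Char) :
    (if !(pvPartition3 h pvSep).2.1.isEmpty &&
        PySem.Set.contains pvSchemeNames (PySem.Chars.lower (pvPartition3 h pvSep).1)
     then (pvPartition3 h pvSep).2.2 else h) = pvStripC h := by
  unfold pvPartition3 pvStripC pvSep
  by_cases hf : PySem.Chars.find h [':', '/', '/'] = -1
  · simp [hf]
  · simp [hf]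

-- a one-character pattern prefixes a list iff it is its head
lemma pv_prefix_single (c : Char) (xs : List Char) :
    ([c].isPrefixOf xs) = true ↔ xs[0]? = some c := by
  rw [List.isPrefixOf_iff_prefix]
  cases xs with
  | nil => simp
  | cons x t => simp [List.cons_prefix_cons, eq_comm]

-- rfind on a one-character needle returns the last occurrence
lemma pv_rfind_go_eq (cs : List Char) (c : Char) (k r : Nat) (hr : r ≤ k)
    (hc : cs[r]? = some c) (hafter : ∀ j, r < j → j ≤ k → cs[j]? ≠ some c) :
    PySem.Chars.rfind.go cs [c] k = (r : Int) := by
  induction k with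
  | zero =>
    have : r = 0 := by omega
    subst this
    show (if [c].isPrefixOf cs then (0:Int) else -1) = 0
    rw [if_pos ((pv_prefix_single c cs).mpr hc)]
  | succ k ih =>
    show (if [c].isPrefixOf (cs.drop (k+1)) then ((k+1 : Nat) : Int) else PySem.Chars.rfind.go cs [c] k) = r
    by_cases hrk : r = k + 1
    · subst hrk
      rw [if_pos]
      rw [pv_prefix_single]
      rw [List.getElem?_drop]
      simpa using hc
    · rw [if_neg, ih (by omega) (fun j h1 h2 => hafter j h1 (by omega))]
      rw [pv_prefix_single, List.getElem?_drop]
      simpa using hafter (k+1) (by omega) (by omega)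

lemma pv_rfind_colon (cs : List Char) (r : Nat) (hc : cs[r]? = some ':')
    (hmax : ∀ j, r < j → cs[j]? ≠ some ':') :
    PySem.Chars.rfind cs [':'] = (r : Int) := by
  have hr : r < cs.length := by
    by_contra hh
    rw [List.getElem?_eq_none (by omega)] at hc
    cases hc
  exact pv_rfind_go_eq cs ':' cs.length r (by omega) hc (fun j h1 _ => hmax j h1)

lemma pv_getD_eq (cs : List Char) (j : Nat) (c : Char) (h : cs[j]? = some c) :
    cs.getD j ' ' = c := by
  rw [List.getD_eq_getElem?_getD, h]
  rfl

lemma pv_getD_some (cs : List Char) (j : Nat) (hj : j < cs.length) :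
    cs[j]? = some (cs.getD j ' ') := by
  simp [List.getD_eq_getElem?_getD, List.getElem?_eq_getElem hj]

lemma pv_lt_len (cs : List Char) (j : Nat) (c : Char) (h : cs[j]? = some c) :
    j < cs.length := by
  by_contra hh
  rw [List.getElem?_eq_none (by omega)] at h
  cases h

lemma pv_prefix_drop_single (cs : List Char) (r : Nat) (c : Char) (h : cs[r]? = some c) :
    [c] <+: cs.drop r := by
  refine List.isPrefixOf_iff_prefix.mp ((pv_prefix_single c (cs.drop r)).mpr ?_)
  rw [List.getElem?_drop]
  simpa using h

lemma pv_isIn_colon (cs : List Char) (r : Nat) (h : cs[r]? = some ':') :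
    PySem.Chars.isIn [':'] cs = true := by
  rw [← PySem.Chars.exists_prefix_drop_iff_isIn]
  exact ⟨r, pv_prefix_drop_single cs r ':' h⟩

-- the tail from index m on is nonempty and all digits, stated by index
lemma pv_strIsdigit_iff (cs : List Char) (m : Nat) :
    PySem.Chars.strIsdigit (cs.drop m) = true ↔
      m < cs.length ∧ ∀ j, m ≤ j → j < cs.length → PySem.Chars.isdigit (cs.getD j ' ') = true := by
  unfold PySem.Chars.strIsdigit
  rw [Bool.and_eq_true, List.all_eq_true]
  constructor
  · rintro ⟨h1, h2⟩
    have hm : m < cs.length := by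
      by_contra hh
      rw [List.drop_eq_nil_of_le (by omega)] at h1
      simp at h1
    refine ⟨hm, fun j hj1 hj2 => ?_⟩
    have hg : (cs.drop m)[j - m]? = some (cs.getD j ' ') := by
      rw [List.getElem?_drop, show m + (j - m) = j by omega]
      exact pv_getD_some cs j hj2
    exact h2 _ (List.mem_of_getElem? hg)
  · rintro ⟨hm, h⟩
    constructor
    · simpa [List.isEmpty_iff, List.drop_eq_nil_iff] using by omega
    · intro x hx
      obtain ⟨i, hi, he⟩ := List.mem_iff_getElem.mp hx
      have hg : cs[m + i]? = some x := by
        rw [← List.getElem?_drop, List.getElem?_eq_getElem hi, he]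
      have hlen := pv_lt_len cs (m + i) x hg
      rw [← pv_getD_eq cs (m + i) x hg]
      exact h (m + i) (by omega) hlen

-- pvPortTail strips exactly at the last colon when everything after it is digits
lemma pv_portTail_strip (cs : List Char) (d : Int) (r : Nat)
    (hc : cs[r]? = some ':') (hmax : ∀ j, r < j → cs[j]? ≠ some ':')
    (hdig : PySem.Chars.strIsdigit (cs.drop (r + 1)) = true) :
    pvPortTail cs d = (cs.take r, (PySem.Int.ofChars? (cs.drop (r + 1))).getD 0) := by
  simp only [pvPortTail]
  rw [if_pos (pv_isIn_colon cs r hc), pv_rfind_colon cs r hc hmax]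
  simp only [Int.toNat_natCast]
  rw [if_pos hdig]

lemma pv_portTail_nostrip (cs : List Char) (d : Int)
    (h : ∀ r : Nat, cs[r]? = some ':' → (∀ j, r < j → cs[j]? ≠ some ':') →
      PySem.Chars.strIsdigit (cs.drop (r + 1)) = false) :
    pvPortTail cs d = (cs, d) := by
  by_cases hin : PySem.Chars.isIn [':'] cs = true
  · have hinf := (PySem.Chars.isIn_iff_infix _ _).mp hin
    have hmem : ':' ∈ cs := hinf.subset (by simp)
    obtain ⟨n, hn, he⟩ := List.mem_iff_getElem.mp hmem
    have hP : cs[n]? = some ':' := by rw [List.getElem?_eq_getElem hn, he]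
    have hPr0 : cs[Nat.findGreatest (fun j => cs[j]? = some ':') cs.length]? = some ':' :=
      Nat.findGreatest_spec (P := fun j => cs[j]? = some ':') (n := cs.length) (m := n)
        (le_of_lt hn) hP
    have hmaxr : ∀ j, Nat.findGreatest (fun j => cs[j]? = some ':') cs.length < j →
        cs[j]? ≠ some ':' := by
      intro j hj
      by_cases hjl : j ≤ cs.length
      · exact Nat.findGreatest_is_greatest hj hjl
      · rw [List.getElem?_eq_none (by omega)]
        simp
    simp only [pvPortTail]
    rw [if_pos hin, pv_rfind_colon cs _ hPr0 hmaxr]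
    simp only [Int.toNat_natCast]
    rw [if_neg (by simp [h _ hPr0 hmaxr])]
  · simp only [pvPortTail]
    rw [if_neg hin]

-- the backward digit scan: result bounds, all digits after it, non-digit at it
lemma pv_scan_spec (cs : List Char) (k : Nat) :
    -1 ≤ pvScanB cs k ∧ pvScanB cs k < (k : Int) ∧
    (∀ j : Nat, pvScanB cs k < (j : Int) → j < k → PySem.Chars.isdigit (cs.getD j ' ') = true) ∧
    (0 ≤ pvScanB cs k → PySem.Chars.isdigit (cs.getD (pvScanB cs k).toNat ' ') = false) := by
  induction k with
  | zero => exact ⟨le_refl _, by norm_num [pvScanB], fun j h1 h2 => by omega, fun h => by norm_num [pvScanB] at h⟩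
  | succ k ih =>
    obtain ⟨p1, p2, p3, p4⟩ := ih
    have he0 : pvScanB cs (k+1)
        = if PySem.Chars.isdigit (cs.getD k ' ') then pvScanB cs k else (k : Int) := rfl
    by_cases hd : PySem.Chars.isdigit (cs.getD k ' ') = true
    · rw [he0, if_pos hd]
      refine ⟨p1, by push_cast; omega, ?_, p4⟩
      intro j h1 h2
      by_cases hj : j = k
      · subst hj; exact hd
      · exact p3 j h1 (by omega)
    · rw [he0, if_neg hd]
      refine ⟨by omega, by push_cast; omega, ?_, ?_⟩
      · intro j h1 h2; omega
      · intro _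
        rw [Int.toNat_natCast]
        simpa using hd

-- B's backward-scan peel computes exactly A's rsplit-based tail
lemma pv_tail_eq (cs : List Char) (d : Int) :
    (if 0 ≤ pvScanB cs cs.length ∧ pvScanB cs cs.length < (cs.length : Int) - 1 ∧
        cs.getD (pvScanB cs cs.length).toNat ' ' = ':' then
      (cs.take (pvScanB cs cs.length).toNat,
        (PySem.Int.ofChars? (cs.drop ((pvScanB cs cs.length).toNat + 1))).getD 0)
    else (cs, d)) = pvPortTail cs d := by
  obtain ⟨p1, p2, p3, p4⟩ := pv_scan_spec cs cs.length
  by_cases hB : 0 ≤ pvScanB cs cs.length ∧ pvScanB cs cs.length < (cs.length : Int) - 1 ∧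
      cs.getD (pvScanB cs cs.length).toNat ' ' = ':'
  · obtain ⟨h0, h1, h2⟩ := hB
    have hri : ((pvScanB cs cs.length).toNat : Int) = pvScanB cs cs.length :=
      Int.toNat_of_nonneg h0
    have hrlen : (pvScanB cs cs.length).toNat + 1 < cs.length := by omega
    have hc : cs[(pvScanB cs cs.length).toNat]? = some ':' := by
      have hh := pv_getD_some cs (pvScanB cs cs.length).toNat (by omega)
      rw [h2] at hh
      exact hh
    have hmax : ∀ j, (pvScanB cs cs.length).toNat < j → cs[j]? ≠ some ':' := by
      intro j hj hcol
      by_cases hjl : j < cs.length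
      · have hd := p3 j (by omega) hjl
        rw [pv_getD_eq cs j ':' hcol] at hd
        exact absurd hd (by decide)
      · rw [List.getElem?_eq_none (by omega)] at hcol
        cases hcol
    have hdig : PySem.Chars.strIsdigit (cs.drop ((pvScanB cs cs.length).toNat + 1)) = true :=
      (pv_strIsdigit_iff cs _).mpr ⟨by omega, fun j hj1 hj2 => p3 j (by omega) hj2⟩
    rw [if_pos ⟨h0, h1, h2⟩, pv_portTail_strip cs d _ hc hmax hdig]
  · rw [if_neg hB, pv_portTail_nostrip cs d ?_]
    intro r hcol hmax
    by_contra hh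
    rw [Bool.not_eq_false] at hh
    obtain ⟨hrl, hds⟩ := (pv_strIsdigit_iff cs (r + 1)).mp hh
    have hrlen : r < cs.length := pv_lt_len cs r ':' hcol
    have hnotdig : PySem.Chars.isdigit (cs.getD r ' ') = false := by
      rw [pv_getD_eq cs r ':' hcol]
      decide
    have hir : pvScanB cs cs.length = (r : Int) := by
      rcases lt_trichotomy (pvScanB cs cs.length) (r : Int) with hlt | heq | hgt
      · have := p3 r hlt hrlen
        rw [this] at hnotdig
        cases hnotdig
      · exact heq
      · exfalso
        have h0 : 0 ≤ pvScanB cs cs.length := by omega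
        have h4 := p4 h0
        have hrange : r < (pvScanB cs cs.length).toNat ∧ (pvScanB cs cs.length).toNat < cs.length := by
          omega
        have := hds (pvScanB cs cs.length).toNat (by omega) (by omega)
        rw [this] at h4
        cases h4
    exact hB ⟨by omega, by omega, by rw [hir, Int.toNat_natCast, pv_getD_eq cs r ':' hcol]⟩

lemma pv_prefix_getElem (p l : List Char) (h : p <+: l) (i : Nat) (hi : i < p.length) :
    l[i]? = some p[i] := by
  obtain ⟨t, rfl⟩ := h
  rw [List.getElem?_append_left (by omega), List.getElem?_eq_getElem hi]

lemma pv_sep_at (cs : List Char) (c : Nat) (h : pvSep <+: cs.drop c) :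
    cs[c]? = some ':' ∧ cs[c + 1]? = some '/' ∧ cs[c + 2]? = some '/' := by
  have h0 := pv_prefix_getElem _ _ h 0 (by simp [pvSep])
  have h1 := pv_prefix_getElem _ _ h 1 (by simp [pvSep])
  have h2 := pv_prefix_getElem _ _ h 2 (by simp [pvSep])
  rw [List.getElem?_drop] at h0 h1 h2
  exact ⟨by simpa using h0, by simpa using h1, by simpa using h2⟩

-- a '://' occurrence sits strictly (3 chars) before the stripping colon
lemma pv_c3r (cs : List Char) (c r : Nat) (hsep : pvSep <+: cs.drop c)
    (hc : cs[r]? = some ':') (hmax : ∀ j, r < j → cs[j]? ≠ some ':')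
    (hdig : PySem.Chars.strIsdigit (cs.drop (r + 1)) = true) : c + 3 ≤ r := by
  obtain ⟨s0, s1, s2⟩ := pv_sep_at cs c hsep
  obtain ⟨hrl, hds⟩ := (pv_strIsdigit_iff cs (r + 1)).mp hdig
  have hcr : ¬ r < c := fun hh => hmax c hh s0
  have h1 : c ≠ r := by
    intro he
    subst he
    have hd := hds (c + 1) (by omega) (pv_lt_len cs (c + 1) '/' s1)
    rw [pv_getD_eq cs (c + 1) '/' s1] at hd
    exact absurd hd (by decide)
  have h2 : c + 1 ≠ r := by
    intro he
    rw [← he, s1] at hc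
    cases hc
  have h3 : c + 2 ≠ r := by
    intro he
    rw [← he, s2] at hc
    cases hc
  omega

-- truncating at the stripping colon does not move the first '://'
lemma pv_find_take (cs : List Char) (r : Nat)
    (hc : cs[r]? = some ':') (hmax : ∀ j, r < j → cs[j]? ≠ some ':')
    (hdig : PySem.Chars.strIsdigit (cs.drop (r + 1)) = true) :
    PySem.Chars.find (cs.take r) pvSep = PySem.Chars.find cs pvSep := by
  by_cases hf : PySem.Chars.find cs pvSep = -1
  · rw [hf, PySem.Chars.find_eq_neg_one_iff]
    intro hinf
    exact (PySem.Chars.find_eq_neg_one_iff _ _).mp hf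
      (hinf.trans (List.take_prefix r cs).isInfix)
  · have hnn : 0 ≤ PySem.Chars.find cs pvSep := by
      have := PySem.Chars.neg_one_le_find cs pvSep
      omega
    obtain ⟨hpre, hmin⟩ := PySem.Chars.find_spec hnn
    have hc3 : (PySem.Chars.find cs pvSep).toNat + 3 ≤ r :=
      pv_c3r cs _ r hpre hc hmax hdig
    have hocc : pvSep <+: (cs.take r).drop (PySem.Chars.find cs pvSep).toNat := by
      rw [List.drop_take]
      refine List.prefix_take_iff.mpr ⟨hpre, ?_⟩
      show 3 ≤ r - (PySem.Chars.find cs pvSep).toNat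
      omega
    have hnn' : 0 ≤ PySem.Chars.find (cs.take r) pvSep := by
      rw [PySem.Chars.find_nonneg_iff, ← PySem.Chars.isIn_iff_infix,
        ← PySem.Chars.exists_prefix_drop_iff_isIn]
      exact ⟨_, hocc⟩
    obtain ⟨hpre', hmin'⟩ := PySem.Chars.find_spec hnn'
    have hlift : pvSep <+: cs.drop (PySem.Chars.find (cs.take r) pvSep).toNat := by
      rw [List.drop_take] at hpre'
      exact hpre'.trans (List.take_prefix _ _)
    have hle1 : ¬ (PySem.Chars.find (cs.take r) pvSep).toNat < (PySem.Chars.find cs pvSep).toNat :=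
      fun hh => hmin _ hh hlift
    have hle2 : ¬ (PySem.Chars.find cs pvSep).toNat < (PySem.Chars.find (cs.take r) pvSep).toNat :=
      fun hh => hmin' _ hh hocc
    calc PySem.Chars.find (cs.take r) pvSep
        = ((PySem.Chars.find (cs.take r) pvSep).toNat : Int) := (Int.toNat_of_nonneg hnn').symm
      _ = ((PySem.Chars.find cs pvSep).toNat : Int) := by congr 1; omega
      _ = PySem.Chars.find cs pvSep := Int.toNat_of_nonneg hnn

lemma pv_stripC_drop (cs : List Char) : ∃ m, pvStripC cs = cs.drop m := by
  unfold pvStripC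
  split_ifs
  · exact ⟨_, rfl⟩
  · exact ⟨0, by simp⟩

-- a no-strip tail condition survives dropping a prefix
lemma pv_nostrip_drop (cs : List Char) (m : Nat)
    (h : ∀ r : Nat, cs[r]? = some ':' → (∀ j, r < j → cs[j]? ≠ some ':') →
      PySem.Chars.strIsdigit (cs.drop (r + 1)) = false) :
    ∀ r : Nat, (cs.drop m)[r]? = some ':' → (∀ j, r < j → (cs.drop m)[j]? ≠ some ':') →
      PySem.Chars.strIsdigit ((cs.drop m).drop (r + 1)) = false := by
  intro r hc hmax
  have hc' : cs[m + r]? = some ':' := by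
    rw [← List.getElem?_drop]
    exact hc
  have hmax' : ∀ j, m + r < j → cs[j]? ≠ some ':' := by
    intro j hj
    have hmm := hmax (j - m) (by omega)
    rw [List.getElem?_drop, show m + (j - m) = j by omega] at hmm
    exact hmm
  rw [List.drop_drop, show m + (r + 1) = m + r + 1 by omega]
  exact h (m + r) hc' hmax'

-- scheme stripping and port peeling commute
lemma pv_commute (cs : List Char) (d : Int) :
    pvPortTail (pvStripC cs) d = (pvStripC (pvPortTail cs d).1, (pvPortTail cs d).2) := by
  by_cases hT : ∃ r : Nat, cs[r]? = some ':' ∧ (∀ j, r < j → cs[j]? ≠ some ':') ∧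
      PySem.Chars.strIsdigit (cs.drop (r + 1)) = true
  · obtain ⟨r, hc, hmax, hdig⟩ := hT
    rw [pv_portTail_strip cs d r hc hmax hdig]
    dsimp only
    have hft := pv_find_take cs r hc hmax hdig
    have hcle : (PySem.Chars.find cs pvSep).toNat ≤ r := by
      by_cases hf : PySem.Chars.find cs pvSep = -1
      · simp [hf]
      · have hnn : 0 ≤ PySem.Chars.find cs pvSep := by
          have := PySem.Chars.neg_one_le_find cs pvSep
          omega
        obtain ⟨hpre, -⟩ := PySem.Chars.find_spec hnn
        have := pv_c3r cs _ r hpre hc hmax hdig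
        omega
    have htt : (cs.take r).take (PySem.Chars.find cs pvSep).toNat
        = cs.take (PySem.Chars.find cs pvSep).toNat := by
      rw [List.take_take]
      congr 1
      omega
    unfold pvStripC
    rw [hft, htt]
    by_cases hcond : (PySem.Chars.find cs pvSep != -1 && PySem.Set.contains pvSchemeNames
        (PySem.Chars.lower (cs.take (PySem.Chars.find cs pvSep).toNat))) = true
    · rw [if_pos hcond, if_pos hcond]
      have hf : ¬ PySem.Chars.find cs pvSep = -1 := by
        rcases Bool.and_eq_true .. |>.mp hcond with ⟨h1, -⟩
        simpa using h1
      have hnn : 0 ≤ PySem.Chars.find cs pvSep := by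
        have := PySem.Chars.neg_one_le_find cs pvSep
        omega
      obtain ⟨hpre, -⟩ := PySem.Chars.find_spec hnn
      have hc3 : (PySem.Chars.find cs pvSep).toNat + 3 ≤ r :=
        pv_c3r cs _ r hpre hc hmax hdig
      have hc' : (cs.drop ((PySem.Chars.find cs pvSep).toNat + 3))[r - ((PySem.Chars.find cs pvSep).toNat + 3)]? = some ':' := by
        rw [List.getElem?_drop,
          show (PySem.Chars.find cs pvSep).toNat + 3 + (r - ((PySem.Chars.find cs pvSep).toNat + 3)) = r by omega]
        exact hc
      have hmax' : ∀ j, r - ((PySem.Chars.find cs pvSep).toNat + 3) < j →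
          (cs.drop ((PySem.Chars.find cs pvSep).toNat + 3))[j]? ≠ some ':' := by
        intro j hj
        rw [List.getElem?_drop]
        exact hmax _ (by omega)
      have hdig' : PySem.Chars.strIsdigit ((cs.drop ((PySem.Chars.find cs pvSep).toNat + 3)).drop (r - ((PySem.Chars.find cs pvSep).toNat + 3) + 1)) = true := by
        rw [List.drop_drop,
          show (PySem.Chars.find cs pvSep).toNat + 3 + (r - ((PySem.Chars.find cs pvSep).toNat + 3) + 1) = r + 1 by omega]
        exact hdig
      rw [pv_portTail_strip _ d _ hc' hmax' hdig', List.drop_take, List.drop_drop,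
        show (PySem.Chars.find cs pvSep).toNat + 3 + (r - ((PySem.Chars.find cs pvSep).toNat + 3) + 1) = r + 1 by omega]
    · rw [if_neg hcond, if_neg hcond]
      exact pv_portTail_strip cs d r hc hmax hdig
  · push Not at hT
    have h' : ∀ r : Nat, cs[r]? = some ':' → (∀ j, r < j → cs[j]? ≠ some ':') →
        PySem.Chars.strIsdigit (cs.drop (r + 1)) = false := by
      intro r h1 h2
      by_contra hh
      rw [Bool.not_eq_false] at hh
      exact absurd hh (hT r h1 h2)
    rw [pv_portTail_nostrip cs d h']
    obtain ⟨m, hm⟩ := pv_stripC_drop cs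
    rw [hm, pv_portTail_nostrip (cs.drop m) d (pv_nostrip_drop cs m h')]

-- ===== VERDICT (by name: the statement is the Claim_ definition above) =====
theorem split_host_port_py_spec : Claim_equal_split_host_port_py := by
  intro raw_host default_port _
  unfold Spec_split_host_port_py split_host_port_py split_host_port_py_alt
  simp only [pv_strip_eq]
  rw [show ([':','/','/'] : List Char) = pvSep from rfl]
  rw [pv_tail_eq _ default_port, pv_stripB_eq, pv_commute]
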